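-- pv_equiv track=rewrite | github.com/natdm/aoc | 2022/day3/main.py | p_sum
-- ===== SOURCE A (Python) =====
-- def score(c: str) -> int:
--     o = ord(c)
--
--     if o >= ord("A") and o <= ord("Z"):
--         return o - ord("A") + 27
--     if o >= ord("a") and o <= ord("z"):
--         return o - ord("a") + 1
--
--     return -1
--
-- def p_sum(v: tuple[str, str]) -> int:
--     # keep track of if the value was found
--     # in the left and/or right hand side of
--     # the bag
--     m: dict[str, tuple[bool, bool]] = {}
--
--     for i in v[0]:
--         m[i] = (True, False)
--
--     for i in v[1]:
--         vv = m.get(i, (False, False))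
--         _vv = (vv[0], True)
--         m[i] = _vv
--
--     top = 0
--
--     for i in m:
--         if m[i] != (True, True):
--             continue
--
--         current_score = score(i)
--         if current_score > top:
--             top = current_score
--
--     return top
-- ===== SOURCE B (Python) =====
-- def p_sum(v: tuple[str, str]) -> int:
--     # Scan candidate priorities from highest to lowest and return the first
--     # whose letter occurs in both halves; 0 when no letter is shared.
--     for p in range(52, 0, -1):
--         c = chr(ord("a") + p - 1) if p <= 26 else chr(ord("A") + p - 27)
--         if c in v[0] and c in v[1]:
--             return p
--     return 0
-- ===== Notes on version B (the rewrite author's own statement) =====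
-- stated objective: faster
-- what changed: B inverts the search: instead of tracking which characters were seen in each half and scanning the tracking structure for the best shared one, it enumerates the 52 candidate priorities from highest to lowest and returns the first whose letter is a substring of both halves (0 if none).
import Mathlib
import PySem

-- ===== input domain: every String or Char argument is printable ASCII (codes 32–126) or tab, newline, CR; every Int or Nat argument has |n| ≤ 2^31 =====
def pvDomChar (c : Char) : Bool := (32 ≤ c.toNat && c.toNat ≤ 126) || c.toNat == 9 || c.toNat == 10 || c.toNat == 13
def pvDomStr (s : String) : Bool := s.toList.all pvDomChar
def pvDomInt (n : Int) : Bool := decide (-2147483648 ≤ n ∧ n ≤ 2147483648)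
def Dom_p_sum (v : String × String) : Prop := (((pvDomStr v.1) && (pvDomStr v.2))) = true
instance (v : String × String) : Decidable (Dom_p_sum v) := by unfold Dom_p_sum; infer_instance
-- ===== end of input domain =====

-- B inverts the search: it scans candidate priorities 52..1 and returns the first whose
-- letter occurs in both halves, instead of A's per-character presence tracking (measured faster in a timing run).

-- ===== PORT A =====
def score (c : Char) : Int :=
  let o : Int := c.toNat
  if 65 ≤ o ∧ o ≤ 90 then o - 65 + 27
  else if 97 ≤ o ∧ o ≤ 122 then o - 97 + 1
  else -1

def p_sum (v : String × String) : Int :=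
  let m : PySem.Dict Char (Bool × Bool) :=
    v.1.toList.foldl (fun m i => m.insert i (true, false)) PySem.Dict.empty
  let m : PySem.Dict Char (Bool × Bool) :=
    v.2.toList.foldl (fun m i =>
      let vv := m.getD i (false, false)
      let _vv := (vv.1, true)
      m.insert i _vv) m
  m.keys.foldl (fun top i =>
    if m.getD i (false, false) ≠ (true, true) then top
    else
      let current_score := score i
      if current_score > top then current_score else top) 0

-- ===== PORT B =====
-- chr(ord("a") + p - 1) / chr(ord("A") + p - 27); p stays in 1..52 where Char.ofNat is exact
def pSumAltChar (p : Int) : Char :=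
  if p ≤ 26 then Char.ofNat (97 + p - 1).toNat else Char.ofNat (65 + p - 27).toNat

-- the for-loop with its early return; `c in v[0]` for a 1-char string is char membership
def pSumAltLoop (v : String × String) : List Int → Int
  | [] => 0
  | p :: rest =>
      let c := pSumAltChar p
      if c ∈ v.1.toList ∧ c ∈ v.2.toList then p else pSumAltLoop v rest

def p_sum_alt (v : String × String) : Int :=
  pSumAltLoop v (PySem.List.pyRange 52 0 (-1))

-- ===== PRECONDITION & SPEC =====
def Spec_p_sum (v : String × String) (out : Int) : Prop := out = p_sum_alt v
instance (v : String × String) (out : Int) : Decidable (Spec_p_sum v out) := by unfold Spec_p_sum; infer_instance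

-- ===== CLAIM (what is proved, stated in full; the proofs are below) =====
def Claim_equal_p_sum : Prop := ∀ (v : String × String), Dom_p_sum v → Spec_p_sum v (p_sum v)

-- ===== LEMMAS AND PROOFS =====

-- getD through A's first loop
lemma getD_loop1 (l : List Char) (d : PySem.Dict Char (Bool × Bool)) (c : Char) :
    (l.foldl (fun m i => m.insert i (true, false)) d).getD c (false, false)
      = if c ∈ l then (true, false) else d.getD c (false, false) := by
  induction l generalizing d with
  | nil => simp
  | cons x xs ih =>
      simp only [List.foldl_cons, ih, List.mem_cons, PySem.Dict.getD_insert]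
      by_cases hx : c = x <;> simp [hx]

-- getD through A's second loop
lemma getD_loop2 (l : List Char) (d : PySem.Dict Char (Bool × Bool)) (c : Char) :
    (l.foldl (fun m i => m.insert i ((m.getD i (false, false)).1, true)) d).getD c (false, false)
      = if c ∈ l then ((d.getD c (false, false)).1, true) else d.getD c (false, false) := by
  induction l generalizing d with
  | nil => simp
  | cons x xs ih =>
      simp only [List.foldl_cons, ih, List.mem_cons, PySem.Dict.getD_insert]
      by_cases hx : c = x <;> simp [hx]

-- A's third loop with the (True, True) test = max-fold over the filtered key list
lemma foldl_body_eq (m : PySem.Dict Char (Bool × Bool)) (l : List Char) (t : Int) :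
    l.foldl (fun top i =>
        if m.getD i (false, false) ≠ (true, true) then top
        else if score i > top then score i else top) t
      = (l.filter (fun i => m.getD i (false, false) = (true, true))).foldl
          (fun top i => max top (score i)) t := by
  induction l generalizing t with
  | nil => rfl
  | cons x xs ih =>
      simp only [List.foldl_cons, List.filter_cons]
      by_cases h : m.getD x (false, false) = (true, true)
      · simp only [h, ne_eq, not_true_eq_false, if_false, decide_true, if_true,
          List.foldl_cons, ih]
        congr 1
        rcases le_or_gt (score x) t with h' | h'
        · simp [max_eq_left h', not_lt.mpr h']
        · simp [max_eq_right h'.le, h']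
      · simp only [h, ne_eq, not_false_eq_true, if_true, decide_false, Bool.false_eq_true,
          if_false, ih]

-- the concrete range(52, 0, -1)
lemma pyRange_52 : PySem.List.pyRange 52 0 (-1)
    = [52,51,50,49,48,47,46,45,44,43,42,41,40,39,38,37,36,35,34,33,32,31,30,29,28,27,
       26,25,24,23,22,21,20,19,18,17,16,15,14,13,12,11,10,9,8,7,6,5,4,3,2,1] := by decide

lemma score_le_52 (c : Char) : score c ≤ 52 := by
  simp only [score]
  split_ifs with h1 h2 <;> omega

lemma score_pos_or (c : Char) : 1 ≤ score c ∨ score c ≤ 0 := by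
  simp only [score]
  split_ifs with h1 h2 <;> omega

lemma charOf_score (c : Char) (h : 1 ≤ score c) : pSumAltChar (score c) = c := by
  by_cases hA : 65 ≤ (c.toNat : Int) ∧ (c.toNat : Int) ≤ 90
  · have hs : score c = (c.toNat : Int) - 65 + 27 := by simp only [score]; rw [if_pos hA]
    rw [hs]
    simp only [pSumAltChar]
    rw [if_neg (by omega : ¬ ((c.toNat : Int) - 65 + 27 ≤ 26))]
    have he : (65 + ((c.toNat : Int) - 65 + 27) - 27) = ((c.toNat : Int)) := by ring
    rw [he, Int.toNat_natCast, Char.ofNat_toNat]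
  · by_cases ha : 97 ≤ (c.toNat : Int) ∧ (c.toNat : Int) ≤ 122
    · have hs : score c = (c.toNat : Int) - 97 + 1 := by simp only [score]; rw [if_neg hA, if_pos ha]
      rw [hs]
      simp only [pSumAltChar]
      rw [if_pos (by omega : ((c.toNat : Int) - 97 + 1 ≤ 26))]
      have he : (97 + ((c.toNat : Int) - 97 + 1) - 1) = ((c.toNat : Int)) := by ring
      rw [he, Int.toNat_natCast, Char.ofNat_toNat]
    · have hs : score c = -1 := by simp only [score]; rw [if_neg hA, if_neg ha]
      rw [hs] at h
      omega

lemma score_char (p : Int) (h1 : 1 ≤ p) (h2 : p ≤ 52) : score (pSumAltChar p) = p := by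
  by_cases hle : p ≤ 26
  · have hc : pSumAltChar p = Char.ofNat (97 + p - 1).toNat := by simp [pSumAltChar, hle]
    have hval : Nat.isValidChar (97 + p - 1).toNat := Or.inl (by omega)
    have ho : (((pSumAltChar p).toNat : Int)) = 96 + p := by
      rw [hc, Char.toNat_ofNat, if_pos hval]
      omega
    simp only [score, ho]
    rw [if_neg (by omega), if_pos (by omega)]
    omega
  · have hc : pSumAltChar p = Char.ofNat (65 + p - 27).toNat := by simp [pSumAltChar, hle]
    have hval : Nat.isValidChar (65 + p - 27).toNat := Or.inl (by omega)
    have ho : (((pSumAltChar p).toNat : Int)) = 38 + p := by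
      rw [hc, Char.toNat_ofNat, if_pos hval]
      omega
    simp only [score, ho]
    rw [if_pos (by omega)]
    omega

lemma mem_L52_bounds (p : Int) (h : p ∈ PySem.List.pyRange 52 0 (-1)) : 1 ≤ p ∧ p ≤ 52 := by
  rw [pyRange_52] at h
  simp only [List.mem_cons, List.not_mem_nil, or_false] at h
  omega

lemma mem_L52 (p : Int) (h1 : 1 ≤ p) (h2 : p ≤ 52) : p ∈ PySem.List.pyRange 52 0 (-1) := by
  rw [pyRange_52]
  simp only [List.mem_cons, List.not_mem_nil, or_false]
  omega

-- B's descending scan: result is ≥ 0, dominates every hit, and is 0 or itself a hit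
lemma loop_spec (v : String × String) :
    ∀ l : List Int, l.Pairwise (· > ·) → (∀ p ∈ l, 0 < p) →
      0 ≤ pSumAltLoop v l ∧
      (∀ p ∈ l, pSumAltChar p ∈ v.1.toList ∧ pSumAltChar p ∈ v.2.toList → p ≤ pSumAltLoop v l) ∧
      (pSumAltLoop v l = 0 ∨ (pSumAltLoop v l ∈ l ∧
        pSumAltChar (pSumAltLoop v l) ∈ v.1.toList ∧ pSumAltChar (pSumAltLoop v l) ∈ v.2.toList)) := by
  intro l
  induction l with
  | nil => intro _ _; exact ⟨le_refl 0, by simp, Or.inl rfl⟩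
  | cons x xs ih =>
      intro hpw hpos
      rw [List.pairwise_cons] at hpw
      have ihx := ih hpw.2 (fun p hp => hpos p (List.mem_cons_of_mem _ hp))
      by_cases hx : pSumAltChar x ∈ v.1.toList ∧ pSumAltChar x ∈ v.2.toList
      · have hr : pSumAltLoop v (x :: xs) = x := by simp [pSumAltLoop, hx]
        rw [hr]
        refine ⟨(hpos x (List.mem_cons_self)).le, ?_, Or.inr ⟨List.mem_cons_self, hx⟩⟩
        intro p hp _
        rcases List.mem_cons.mp hp with h | h
        · exact h.le
        · exact (hpw.1 p h).le
      · have hr : pSumAltLoop v (x :: xs) = pSumAltLoop v xs := by simp [pSumAltLoop, hx]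
        rw [hr]
        refine ⟨ihx.1, ?_, ?_⟩
        · intro p hp hq
          rcases List.mem_cons.mp hp with h | h
          · exact absurd (h ▸ hq) hx
          · exact ihx.2.1 p h hq
        · rcases ihx.2.2 with h | h
          · exact Or.inl h
          · exact Or.inr ⟨List.mem_cons_of_mem _ h.1, h.2⟩

-- max-fold facts
lemma fold_lb (C : List Char) (t : Int) :
    t ≤ C.foldl (fun top i => max top (score i)) t := by
  induction C generalizing t with
  | nil => exact le_refl t
  | cons x xs ih => exact le_trans (le_max_left _ _) (ih _)

lemma fold_ub (C : List Char) (t : Int) (c : Char) (h : c ∈ C) :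
    score c ≤ C.foldl (fun top i => max top (score i)) t := by
  induction C generalizing t with
  | nil => cases h
  | cons x xs ih =>
      simp only [List.foldl_cons]
      rcases List.mem_cons.mp h with h' | h'
      · exact le_trans (h' ▸ le_max_right t (score x)) (fold_lb xs _)
      · exact ih _ h'

lemma fold_cases (C : List Char) (t : Int) :
    C.foldl (fun top i => max top (score i)) t = t ∨
    ∃ c ∈ C, C.foldl (fun top i => max top (score i)) t = score c := by
  induction C generalizing t with
  | nil => exact Or.inl rfl
  | cons x xs ih =>
      simp only [List.foldl_cons]
      rcases ih (max t (score x)) with h | ⟨c, hc, h⟩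
      · rcases max_cases t (score x) with ⟨he, _⟩ | ⟨he, _⟩
        · exact Or.inl (h.trans he)
        · exact Or.inr ⟨x, List.mem_cons_self, h.trans he⟩
      · exact Or.inr ⟨c, List.mem_cons_of_mem _ hc, h⟩

theorem p_sum_spec : Claim_equal_p_sum := by
  intro v _
  unfold Spec_p_sum p_sum p_sum_alt
  simp only []
  set m : PySem.Dict Char (Bool × Bool) :=
    List.foldl (fun (m : PySem.Dict Char (Bool × Bool)) i =>
        m.insert i ((m.getD i (false, false)).1, true))
      (List.foldl (fun (m : PySem.Dict Char (Bool × Bool)) i =>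
        m.insert i (true, false)) PySem.Dict.empty v.1.toList) v.2.toList with hm
  have hget : ∀ c, m.getD c (false, false)
      = (decide (c ∈ v.1.toList), decide (c ∈ v.2.toList)) := by
    intro c
    rw [hm, getD_loop2, getD_loop1]
    by_cases h1 : c ∈ v.1.toList <;> by_cases h2 : c ∈ v.2.toList <;> simp [h1, h2]
  have hkeys : ∀ c, c ∈ m.keys ↔ c ∈ v.1.toList ∨ c ∈ v.2.toList := by
    intro c
    rw [hm, PySem.Dict.keys_foldl_insert, PySem.Dict.keys_foldl_insert]
    simp [PySem.Set.mem_update, PySem.Dict.keys_empty]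
  rw [foldl_body_eq]
  set F := m.keys.filter (fun i => m.getD i (false, false) = (true, true)) with hF
  have hmemF : ∀ c, c ∈ F ↔ c ∈ v.1.toList ∧ c ∈ v.2.toList := by
    intro c
    rw [hF, List.mem_filter]
    simp only [hget c, hkeys c, Prod.mk.injEq, decide_eq_true_eq]
    constructor
    · rintro ⟨-, h⟩; simpa using h
    · rintro ⟨h1, h2⟩; exact ⟨Or.inl h1, by simp [h1, h2]⟩
  have hpw : (PySem.List.pyRange 52 0 (-1)).Pairwise (· > ·) := by
    rw [pyRange_52]; decide
  have hpos : ∀ p ∈ PySem.List.pyRange 52 0 (-1), (0 : Int) < p := by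
    rw [pyRange_52]; decide
  obtain ⟨hR0, hRdom, hRhit⟩ := loop_spec v _ hpw hpos
  apply le_antisymm
  · rcases fold_cases F 0 with h | ⟨c, hc, h⟩
    · rw [h]; exact hR0
    · rw [h]
      rcases score_pos_or c with hp | hp
      · have hmem := mem_L52 (score c) hp (score_le_52 c)
        have hc12 := (hmemF c).mp hc
        refine hRdom (score c) hmem ?_
        rw [charOf_score c hp]; exact hc12
      · exact le_trans hp hR0
  · rcases hRhit with h | ⟨hmem, h1, h2⟩
    · rw [h]; exact fold_lb F 0
    · have hb := mem_L52_bounds _ hmem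
      have hcF : pSumAltChar (pSumAltLoop v (PySem.List.pyRange 52 0 (-1))) ∈ F :=
        (hmemF _).mpr ⟨h1, h2⟩
      have hub := fold_ub F 0 _ hcF
      rwa [score_char _ hb.1 hb.2] at hub
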